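-- pv_equiv track=rewrite | github.com/wtsng85-lab/dataforge-api | app/validators/crypto.py | _is_valid_bech32
-- ===== SOURCE A (Python) =====
-- _BECH32_CHARSET = "qpzry9x8gf2tvdw0s3jn54khce6mua7l"
--
-- def _is_valid_bech32(address: str) -> bool:
--     """Validate a Bech32/Bech32m address (BTC segwit)."""
--     lower = address.lower()
--     if not lower.startswith(("bc1q", "bc1p")):
--         return False
--     if not all(c in _BECH32_CHARSET for c in lower[4:]):
--         return False
--     data_len = len(lower) - 4
--     # bc1q (v0): 20 or 32 byte witness → 32 or 52 bech32 chars
--     # bc1p (v1): 32 byte witness → 52 bech32 chars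
--     if lower.startswith("bc1q"):
--         return data_len in (32, 52)
--     if lower.startswith("bc1p"):
--         return data_len == 52
--     return False
-- ===== SOURCE B (Python) =====
-- _BECH32_CHARSET = "qpzry9x8gf2tvdw0s3jn54khce6mua7l"
--
-- def _is_valid_bech32(address: str) -> bool:
--     """Validate a Bech32/Bech32m address (BTC segwit) with a single-pass DFA.
--
--     States: 0,1,2 expect 'b','c','1'; 3 expects the version char ('q' -> 4,
--     'p' -> 5); in states 4/5 every char must be in the charset and is counted.
--     Accept iff the run ends in state 4 with 32 or 52 data chars, or state 5
--     with exactly 52.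
--     """
--     state = 0
--     count = 0
--     for c in address.lower():
--         if state == 0:
--             state = 1 if c == 'b' else -1
--         elif state == 1:
--             state = 2 if c == 'c' else -1
--         elif state == 2:
--             state = 3 if c == '1' else -1
--         elif state == 3:
--             state = 4 if c == 'q' else (5 if c == 'p' else -1)
--         elif state == 4 or state == 5:
--             if c in _BECH32_CHARSET:
--                 count += 1
--             else:
--                 state = -1
--         else:
--             return False
--     if state == 4:
--         return count == 32 or count == 52
--     if state == 5:
--         return count == 52
--     return False
-- ===== Notes on version B (the rewrite author's own statement) =====
-- stated objective: alternative
-- what changed: B replaces A's staged checks (startswith prefix test, all()-loop over a slice, then a length branch) with a single-pass finite state machine that consumes the lowercased string character by character, tracking a state and a data-character count, and accepts on the final state/count.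
import Mathlib
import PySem

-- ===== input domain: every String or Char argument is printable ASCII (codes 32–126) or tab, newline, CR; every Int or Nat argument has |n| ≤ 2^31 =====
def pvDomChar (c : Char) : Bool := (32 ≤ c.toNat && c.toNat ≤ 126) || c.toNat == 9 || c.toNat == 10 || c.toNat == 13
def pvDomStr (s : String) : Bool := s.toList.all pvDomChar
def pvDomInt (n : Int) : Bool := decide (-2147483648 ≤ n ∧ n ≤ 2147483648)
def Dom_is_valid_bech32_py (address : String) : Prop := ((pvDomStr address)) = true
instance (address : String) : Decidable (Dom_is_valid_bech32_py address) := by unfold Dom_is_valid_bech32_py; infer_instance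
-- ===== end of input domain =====

-- B validates the same Bech32 shape with a single-pass finite state machine over the
-- lowercased string (state + data-char count) instead of A's startswith + slice-scan +
-- length-branch staging (objective: alternative).


set_option maxRecDepth 4096

-- ===== PORT A =====
def bech32Charset : String := "qpzry9x8gf2tvdw0s3jn54khce6mua7l"

def is_valid_bech32_py (address : String) : Bool :=
  let lower := PySem.Str.lower address
  if !(PySem.Str.startswith lower "bc1q" || PySem.Str.startswith lower "bc1p") then false
  else if !((PySem.Str.slice lower (some 4) none).toList.all
              (fun c => PySem.Chars.isIn [c] bech32Charset.toList)) then false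
  else
    let dataLen : Int := (PySem.Str.len lower : Int) - 4
    if PySem.Str.startswith lower "bc1q" then dataLen == 32 || dataLen == 52
    else if PySem.Str.startswith lower "bc1p" then dataLen == 52
    else false

-- ===== PORT B =====
-- B's loop over the lowercased chars, carrying (state, count); the final length check
-- is the Python code after the loop, reached when the list is exhausted.
def bech32Run : List Char → Int → Int → Bool
  | [], state, count =>
      if state == 4 then count == 32 || count == 52
      else if state == 5 then count == 52
      else false
  | c :: rest, state, count =>
      if state == 0 then bech32Run rest (if c == 'b' then 1 else -1) count
      else if state == 1 then bech32Run rest (if c == 'c' then 2 else -1) count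
      else if state == 2 then bech32Run rest (if c == '1' then 3 else -1) count
      else if state == 3 then bech32Run rest (if c == 'q' then 4 else if c == 'p' then 5 else -1) count
      else if state == 4 || state == 5 then
        if PySem.Chars.isIn [c] bech32Charset.toList then bech32Run rest state (count + 1)
        else bech32Run rest (-1) count
      else false   -- dead state: Python's early 'return False'

def is_valid_bech32_py_alt (address : String) : Bool :=
  bech32Run (PySem.Str.lower address).toList 0 0

-- ===== PRECONDITION & SPEC =====
def Spec_is_valid_bech32_py (address : String) (out : Bool) : Prop := out = is_valid_bech32_py_alt address
instance (address : String) (out : Bool) : Decidable (Spec_is_valid_bech32_py address out) := by unfold Spec_is_valid_bech32_py; infer_instance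

-- ===== CLAIM (what is proved, stated in full; the proofs are below) =====
def Claim_equal_is_valid_bech32_py : Prop := ∀ (address : String), Dom_is_valid_bech32_py address → Spec_is_valid_bech32_py address (is_valid_bech32_py address)

-- ===== LEMMAS AND PROOFS =====

lemma run_dead (l : List Char) (count : Int) : bech32Run l (-1) count = false := by
  cases l <;> rfl

lemma run_data (l : List Char) (count : Int) (st : Int) (hst : st = 4 ∨ st = 5) :
    bech32Run l st count
      = (l.all (fun c => PySem.Chars.isIn [c] bech32Charset.toList)
          && (if st = 4 then ((count + l.length == 32) || (count + l.length == 52))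
              else (count + l.length == 52))) := by
  induction l generalizing count with
  | nil =>
      rcases hst with rfl | rfl <;> simp [bech32Run]
  | cons c rest ih =>
      have h0 : (st == 0) = false := by rcases hst with rfl | rfl <;> rfl
      have h1 : (st == 1) = false := by rcases hst with rfl | rfl <;> rfl
      have h2 : (st == 2) = false := by rcases hst with rfl | rfl <;> rfl
      have h3 : (st == 3) = false := by rcases hst with rfl | rfl <;> rfl
      have h45 : (st == 4 || st == 5) = true := by rcases hst with rfl | rfl <;> rfl
      by_cases hc : PySem.Chars.isIn [c] bech32Charset.toList = true
      · simp only [bech32Run, h0, h1, h2, h3, h45, hc, if_true, if_false,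
          Bool.false_eq_true, ih (count + 1), List.all_cons, List.length_cons]
        have : count + 1 + (rest.length : Int) = count + ((rest.length : Int) + 1) := by ring
        push_cast
        rw [this, Bool.true_and]
      · simp only [bech32Run, h0, h1, h2, h3, h45, if_true, Bool.false_eq_true, if_false,
          eq_false_of_ne_true hc, run_dead, List.all_cons]
        simp

lemma slice_from4 (s : String) : (PySem.Str.slice s (some 4) none).toList = s.toList.drop 4 := by
  simp [PySem.Str.toList_slice]
  rw [show ((4:Int) = ((4:Nat):Int)) by norm_num, PySem.List.slice_from_natCast]

lemma sw_take (s p : String) (h : p.toList.length = 4) :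
    PySem.Str.startswith s p = (s.toList.take 4 == p.toList) := by
  rw [Bool.eq_iff_iff, beq_iff_eq]
  rw [show PySem.Str.startswith s p = PySem.Chars.startswith s.toList p.toList from by simp]
  rw [PySem.Chars.startswith_iff, List.prefix_iff_eq_take, h, eq_comm]

lemma strlen_eq (s : String) : PySem.Str.len s = s.toList.length := by simp [PySem.Str.len]

lemma main_eq (address : String) : is_valid_bech32_py address = is_valid_bech32_py_alt address := by
  unfold is_valid_bech32_py is_valid_bech32_py_alt
  generalize PySem.Str.lower address = s
  dsimp only
  rw [sw_take s "bc1q" (by rfl), sw_take s "bc1p" (by rfl), slice_from4, strlen_eq]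
  match hl : s.toList with
  | [] => rfl
  | [a] =>
      have hq : ([a] == "bc1q".toList) = false := by
        show (a == 'b' && false) = false; simp
      have hp : ([a] == "bc1p".toList) = false := by
        show (a == 'b' && false) = false; simp
      rw [show List.take 4 [a] = [a] from rfl, hq, hp]
      by_cases ha : a = 'b' <;> simp [bech32Run, beq_iff_eq, ha]
  | [a, b] =>
      have hq : ([a, b] == "bc1q".toList) = false := by
        show (a == 'b' && (b == 'c' && false)) = false; simp
      have hp : ([a, b] == "bc1p".toList) = false := by
        show (a == 'b' && (b == 'c' && false)) = false; simp
      rw [show List.take 4 [a, b] = [a, b] from rfl, hq, hp]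
      by_cases ha : a = 'b' <;> by_cases hb : b = 'c' <;>
        simp [bech32Run, beq_iff_eq, ha, hb]
  | [a, b, c] =>
      have hq : ([a, b, c] == "bc1q".toList) = false := by
        show (a == 'b' && (b == 'c' && (c == '1' && false))) = false; simp
      have hp : ([a, b, c] == "bc1p".toList) = false := by
        show (a == 'b' && (b == 'c' && (c == '1' && false))) = false; simp
      rw [show List.take 4 [a, b, c] = [a, b, c] from rfl, hq, hp]
      by_cases ha : a = 'b' <;> by_cases hb : b = 'c' <;> by_cases hc : c = '1' <;>
        simp [bech32Run, beq_iff_eq, ha, hb, hc]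
  | a :: b :: c :: d :: rest =>
      have t4 : (a :: b :: c :: d :: rest).take 4 = [a, b, c, d] := rfl
      have d4 : (a :: b :: c :: d :: rest).drop 4 = rest := rfl
      have hq : ([a, b, c, d] == "bc1q".toList)
          = (a == 'b' && (b == 'c' && (c == '1' && (d == 'q' && true)))) := rfl
      have hp : ([a, b, c, d] == "bc1p".toList)
          = (a == 'b' && (b == 'c' && (c == '1' && (d == 'p' && true)))) := rfl
      rw [t4, d4, hq, hp]
      by_cases ha : a = 'b'
      case neg => simp [bech32Run, beq_iff_eq, ha]
      by_cases hb : b = 'c'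
      case neg => simp [bech32Run, beq_iff_eq, ha, hb]
      by_cases hc : c = '1'
      case neg => simp [bech32Run, beq_iff_eq, ha, hb, hc]
      subst ha hb hc
      by_cases hdq : d = 'q'
      · subst hdq
        rw [show bech32Run ('b' :: 'c' :: '1' :: 'q' :: rest) 0 0 = bech32Run rest 4 0 from rfl,
            run_data rest 0 4 (Or.inl rfl)]
        simp only [beq_self_eq_true, Bool.true_and, Bool.and_true, Bool.true_or,
          Bool.not_true, Bool.false_eq_true, if_false, if_true]
        by_cases hall : rest.all (fun c => PySem.Chars.isIn [c] bech32Charset.toList) = true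
        · simp only [hall, Bool.true_and, Bool.not_true, Bool.false_eq_true, if_false,
            List.length_cons]
          rw [Bool.eq_iff_iff]
          push_cast
          simp only [beq_iff_eq, Bool.or_eq_true]
          constructor <;> (intro h; omega)
        · simp [eq_false_of_ne_true hall]
      by_cases hdp : d = 'p'
      · subst hdp
        rw [show bech32Run ('b' :: 'c' :: '1' :: 'p' :: rest) 0 0 = bech32Run rest 5 0 from rfl,
            run_data rest 0 5 (Or.inr rfl)]
        simp only [beq_self_eq_true, Bool.true_and, Bool.and_true,
          show (('p' : Char) == 'q') = false from rfl, Bool.false_or, Bool.false_and,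
          Bool.not_true, Bool.false_eq_true, if_false, if_true,
          if_neg (by decide : ¬ ((5 : Int) = 4))]
        by_cases hall : rest.all (fun c => PySem.Chars.isIn [c] bech32Charset.toList) = true
        · simp only [hall, Bool.true_and, Bool.not_true, Bool.false_eq_true, if_false,
            List.length_cons]
          rw [Bool.eq_iff_iff]
          push_cast
          simp only [beq_iff_eq]
          constructor <;> (intro h; omega)
        · simp [eq_false_of_ne_true hall]
      · simp [bech32Run, run_dead, beq_iff_eq, hdq, hdp]

-- ===== VERDICT (by name: the statement is the Claim_ definition above) =====
theorem is_valid_bech32_py_spec : Claim_equal_is_valid_bech32_py := by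
  intro address _
  unfold Spec_is_valid_bech32_py
  exact main_eq address
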